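-- pv_equiv track=rewrite | github.com/PrinceSinghhub/GFG-Questions | Carpet into Box.py | carpetBox
-- ===== SOURCE A (Python) =====
-- def carpetBox(a, b, c, d):
--
--     # code here
--
--     m = 0
--
--     w = 0
--
--     l1, l2 = a, b
--
--     while a > c:
--         a //= 2
--
--         m += 1
--
--     while b > d:
--         b //= 2
--
--         m += 1
--
--     a, b = l2, l1
--
--     while a > c:
--         a //= 2
--
--         w += 1
--
--     while b > d:
--         b //= 2
--
--         w += 1
--
--     return min(m, w)
-- ===== SOURCE B (Python) =====
-- def carpetBox(a, b, c, d):
--     # Closed form: number of halvings of x until x <= lim is the bit length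
--     # of x // (lim + 1); no loops remain.
--     def folds(x, lim):
--         if x <= lim:
--             return 0
--         return (x // (lim + 1)).bit_length()
--     m = folds(a, c) + folds(b, d)
--     w = folds(b, c) + folds(a, d)
--     return min(m, w)
-- ===== Notes on version B (the rewrite author's own statement) =====
-- stated objective: alternative
-- what changed: replaces the four halving while-loops by a closed-form bit_length computation of each fold count
import Mathlib
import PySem

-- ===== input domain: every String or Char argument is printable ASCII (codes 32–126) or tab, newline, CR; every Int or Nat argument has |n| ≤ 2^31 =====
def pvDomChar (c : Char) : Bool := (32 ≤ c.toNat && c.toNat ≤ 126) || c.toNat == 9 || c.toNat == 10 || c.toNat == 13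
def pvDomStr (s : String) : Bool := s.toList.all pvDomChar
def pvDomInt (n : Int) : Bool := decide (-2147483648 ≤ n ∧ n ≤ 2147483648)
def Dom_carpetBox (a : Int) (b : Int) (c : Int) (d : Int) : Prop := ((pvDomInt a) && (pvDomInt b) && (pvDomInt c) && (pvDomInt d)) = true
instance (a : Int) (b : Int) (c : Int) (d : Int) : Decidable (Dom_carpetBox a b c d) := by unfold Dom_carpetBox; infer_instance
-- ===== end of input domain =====

-- B replaces A's four halving while-loops by a closed-form bit_length fold count (alternative decomposition, same exact values).
-- Pre_ excludes only inputs on which A's while-loops never terminate (a negative box side smaller than a carpet side); A returns no value there.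


-- ===== PORT A =====
-- termination helper for the while-loop (cited by decreasing_by)
theorem pvHalve_lt (a : Int) (h : 0 < a) : (PySem.Int.floordiv a 2).toNat < a.toNat := by
  rw [PySem.Int.floordiv_eq_ediv_of_pos (by omega)]
  omega

-- `while a > c: a //= 2; m += 1` — the extra `0 < a` guard only makes the
-- recursion total; it can differ from Python only where Python loops forever
-- (those inputs are outside Pre_carpetBox).
def halveCount (a : Int) (c : Int) : Int :=
  if h : c < a ∧ 0 < a then
    halveCount (PySem.Int.floordiv a 2) c + 1
  else 0
termination_by a.toNat
decreasing_by exact pvHalve_lt a h.2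

def carpetBox (a : Int) (b : Int) (c : Int) (d : Int) : Int :=
  let m := halveCount a c + halveCount b d
  let w := halveCount b c + halveCount a d
  min m w

-- ===== PORT B =====
-- q.bit_length() → PySem.Int.bitLength q (Python-exact)
def folds (x : Int) (lim : Int) : Int :=
  if x ≤ lim then 0
  else (PySem.Int.bitLength (PySem.Int.floordiv x (lim + 1)) : Int)

def carpetBox_alt (a : Int) (b : Int) (c : Int) (d : Int) : Int :=
  let m := folds a c + folds b d
  let w := folds b c + folds a d
  min m w

-- ===== PRECONDITION & SPEC =====
-- Pre_ excludes exactly the inputs where one of A's while-loops never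
-- terminates: that happens iff some loop starts with x > limit and the limit
-- is negative (halving then never reaches the limit). A returns on every
-- input satisfying Pre_.
def Pre_carpetBox (a : Int) (b : Int) (c : Int) (d : Int) : Prop :=
  (a ≤ c ∨ 0 ≤ c) ∧ (b ≤ d ∨ 0 ≤ d) ∧ (b ≤ c ∨ 0 ≤ c) ∧ (a ≤ d ∨ 0 ≤ d)
instance (a : Int) (b : Int) (c : Int) (d : Int) : Decidable (Pre_carpetBox a b c d) := by unfold Pre_carpetBox; infer_instance

def pvWitness_carpetBox : Int × Int × Int × Int := (37, 10, 3, 5)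

def Spec_carpetBox (a : Int) (b : Int) (c : Int) (d : Int) (out : Int) : Prop := out = carpetBox_alt a b c d
instance (a : Int) (b : Int) (c : Int) (d : Int) (out : Int) : Decidable (Spec_carpetBox a b c d out) := by unfold Spec_carpetBox; infer_instance

-- ===== CLAIM (what is proved, stated in full; the proofs are below) =====
def Claim_equal_carpetBox : Prop := ∀ (a : Int) (b : Int) (c : Int) (d : Int), Dom_carpetBox a b c d → Pre_carpetBox a b c d → Spec_carpetBox a b c d (carpetBox a b c d)

-- ===== LEMMAS AND PROOFS =====

-- on terminating inputs the loop count equals the closed form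
theorem halve_eq_pos (c : Int) (hc : 0 ≤ c) (a : Int) : halveCount a c = folds a c := by
  by_cases hac : c < a
  · have ha : 0 < a := by omega
    have hstep : halveCount a c = halveCount (PySem.Int.floordiv a 2) c + 1 := by
      rw [halveCount]; simp [hac, ha]
    have ih : halveCount (PySem.Int.floordiv a 2) c = folds (PySem.Int.floordiv a 2) c :=
      halve_eq_pos c hc (PySem.Int.floordiv a 2)
    have hq1 : (1:Int) ≤ PySem.Int.floordiv a (c+1) :=
      (PySem.Int.le_floordiv_iff_mul_le (by omega)).mpr (by omega)
    have hfa : folds a c = (PySem.Int.bitLength (PySem.Int.floordiv a (c+1)) : Int) := by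
      rw [folds, if_neg (by omega)]
    rw [hstep, ih, hfa, PySem.Int.bitLength_of_pos (by omega : (0:Int) < PySem.Int.floordiv a (c+1))]
    push_cast
    by_cases h2 : PySem.Int.floordiv a 2 ≤ c
    · have ha2 : a < (c+1) * 2 :=
        (PySem.Int.floordiv_lt_iff_lt_mul (by omega)).mp (by omega)
      have hq2 : PySem.Int.floordiv a (c+1) < 2 :=
        (PySem.Int.floordiv_lt_iff_lt_mul (by omega)).mpr (by omega)
      have hq : PySem.Int.floordiv a (c+1) = 1 := by omega
      rw [folds, if_pos h2, hq]
      norm_num [show PySem.Int.bitLength (PySem.Int.floordiv 1 2) = 0 from by decide]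
    · have key : PySem.Int.floordiv (PySem.Int.floordiv a 2) (c+1)
          = PySem.Int.floordiv (PySem.Int.floordiv a (c+1)) 2 := by
        rw [PySem.Int.floordiv_eq_ediv_of_pos (a := a) (by omega : (0:Int) < 2),
            PySem.Int.floordiv_eq_ediv_of_pos (by omega : (0:Int) < c + 1),
            PySem.Int.floordiv_eq_ediv_of_pos (a := a) (by omega : (0:Int) < c + 1),
            PySem.Int.floordiv_eq_ediv_of_pos (by omega : (0:Int) < 2),
            Int.ediv_ediv_of_nonneg (by omega : (0:Int) ≤ 2),
            Int.ediv_ediv_of_nonneg (by omega : (0:Int) ≤ c + 1), Int.mul_comm]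
      rw [folds, if_neg h2, key]
  · rw [halveCount, folds]
    simp [hac, not_lt.mp hac]
termination_by a.toNat
decreasing_by exact pvHalve_lt a ha

theorem halveCount_eq_folds (a c : Int) (hpre : a ≤ c ∨ 0 ≤ c) :
    halveCount a c = folds a c := by
  rcases hpre with hac | hc
  · rw [halveCount, folds]
    simp [hac, not_lt.mpr hac]
  · exact halve_eq_pos c hc a

-- ===== VERDICT (by name: the statement is the Claim_ definition above) =====
theorem carpetBox_spec : Claim_equal_carpetBox := by
  intro a b c d _ hpre
  unfold Spec_carpetBox carpetBox carpetBox_alt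
  obtain ⟨h1, h2, h3, h4⟩ := hpre
  rw [halveCount_eq_folds a c h1, halveCount_eq_folds b d h2,
      halveCount_eq_folds b c h3, halveCount_eq_folds a d h4]
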